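-- pv_equiv track=rewrite | github.com/v1rtu3x/RE_0x04_MByteV | hints/disasm.py | disasm
-- ===== SOURCE A (Python) =====
-- opmap = {
--     0x00: ("NOP", 0),
--     0x01: ("PUSH_IMM", 1),
--     0x02: ("POP_REG", 1),
--     0x03: ("MOV_RR", 1),
--     0x04: ("ADD_RR", 1),
--     0x05: ("SUB_RR", 1),
--     0x06: ("CMP_REG_IMM", 2),
--     0x07: ("JZ", 2),
--     0x08: ("JMP", 2),
--     0x09: ("CALL", 1),
--     0xF9: ("HALT", 0),
-- }
--
-- def read_u8(b, i):
--     return b[i], i + 1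
--
-- def read_s8(b, i):
--     v = b[i]
--     if v >= 0x80:
--         v -= 0x100
--     return v, i + 1
--
-- def read_s16_le(b, i):
--     lo = b[i]
--     hi = b[i + 1]
--     v = (hi << 8) | lo
--     if v >= 0x8000:
--         v -= 0x10000
--     return v, i + 2
--
-- def disasm(b):
--     i = 0
--     out = []
--     while i < len(b):
--         op = b[i]; i += 1
--         name, _ = opmap.get(op, (f"DB_0x{op:02X}", 0))
--
--         if op == 0x01:  # PUSH_IMM
--             val, i = read_s8(b, i)
--             out.append(f"{i-2:04x}: PUSH_IMM {val}")
--
--         elif op == 0x02:  # POP_REG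
--             reg, i = read_u8(b, i)
--             out.append(f"{i-2:04x}: POP_REG R{reg & 3}")
--
--         elif op in (0x03, 0x04, 0x05):  # MOV/ADD/SUB with packed dst/src
--             b1, i = read_u8(b, i)
--             dst = (b1 >> 4) & 0xF
--             src = b1 & 0xF
--             out.append(f"{i-2:04x}: {name} R{dst & 3},R{src & 3}")
--
--         elif op == 0x06:  # CMP_REG_IMM
--             reg, i = read_u8(b, i)
--             imm, i = read_s8(b, i)
--             out.append(f"{i-3:04x}: CMP_REG_IMM R{reg & 3}, {imm}")
--
--         elif op in (0x07, 0x08):  # JZ / JMP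
--             off, i = read_s16_le(b, i)
--             out.append(f"{i-3:04x}: {name} {off:+d}")
--
--         elif op == 0x09:  # CALL selector
--             sel, i = read_u8(b, i)
--             out.append(f"{i-2:04x}: CALL 0x{sel:02x}")
--
--         elif op == 0xF9:  # HALT
--             out.append(f"{i-1:04x}: HALT")
--
--         else:
--             out.append(f"{i-1:04x}: DB 0x{op:02x}")
--     return out
-- ===== SOURCE B (Python) =====
-- # Table-driven re-implementation: one spec table (operand readers + formatter) and a single
-- # generic decode loop replacing the per-opcode if/elif chain. Objective: alternative decomposition.
--
-- def _r_s8(b, i):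
--     v = b[i]
--     return ((v - 0x100) if v >= 0x80 else v,), i + 1
--
-- def _r_reg(b, i):
--     return (b[i] & 3,), i + 1
--
-- def _r_pack(b, i):
--     v = b[i]
--     return ((v >> 4) & 3, v & 3), i + 1
--
-- def _r_s16(b, i):
--     v = (b[i + 1] << 8) | b[i]
--     return ((v - 0x10000) if v >= 0x8000 else v,), i + 2
--
-- def _r_u8(b, i):
--     return (b[i],), i + 1
--
-- _SPECS = {
--     0x01: ((_r_s8,), lambda v: f"PUSH_IMM {v[0]}"),
--     0x02: ((_r_reg,), lambda v: f"POP_REG R{v[0]}"),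
--     0x03: ((_r_pack,), lambda v: f"MOV_RR R{v[0]},R{v[1]}"),
--     0x04: ((_r_pack,), lambda v: f"ADD_RR R{v[0]},R{v[1]}"),
--     0x05: ((_r_pack,), lambda v: f"SUB_RR R{v[0]},R{v[1]}"),
--     0x06: ((_r_reg, _r_s8), lambda v: f"CMP_REG_IMM R{v[0]}, {v[1]}"),
--     0x07: ((_r_s16,), lambda v: f"JZ {v[0]:+d}"),
--     0x08: ((_r_s16,), lambda v: f"JMP {v[0]:+d}"),
--     0x09: ((_r_u8,), lambda v: f"CALL 0x{v[0]:02x}"),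
--     0xF9: ((), lambda v: "HALT"),
-- }
--
-- def disasm(b):
--     out = []
--     i = 0
--     n = len(b)
--     while i < n:
--         start = i
--         op = b[i]
--         i += 1
--         readers, fmt = _SPECS.get(op, ((), lambda v, _op=op: f"DB 0x{_op:02x}"))
--         vals = ()
--         for r in readers:
--             vs, i = r(b, i)
--             vals += vs
--         out.append(f"{start:04x}: " + fmt(vals))
--     return out
-- ===== Notes on version B (the rewrite author's own statement) =====
-- stated objective: alternative
-- what changed: Replaces A's per-opcode if/elif dispatch with a single opcode->(operand-reader list, formatter) spec table and one generic decode loop that applies the readers in turn and formats the start-address-prefixed line.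
import Mathlib
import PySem

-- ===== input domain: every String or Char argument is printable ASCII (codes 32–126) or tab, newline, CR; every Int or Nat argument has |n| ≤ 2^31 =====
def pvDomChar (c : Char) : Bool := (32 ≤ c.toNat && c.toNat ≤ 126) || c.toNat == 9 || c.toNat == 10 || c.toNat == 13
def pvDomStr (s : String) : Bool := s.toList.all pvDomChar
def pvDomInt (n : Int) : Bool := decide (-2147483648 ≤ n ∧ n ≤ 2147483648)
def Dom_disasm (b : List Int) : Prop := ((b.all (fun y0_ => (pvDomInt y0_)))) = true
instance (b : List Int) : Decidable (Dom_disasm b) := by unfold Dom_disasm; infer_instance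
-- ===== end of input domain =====

-- B re-implements disasm with one opcode→(operand readers, formatter) spec table and a single
-- generic decode loop instead of A's per-opcode if/elif chain (objective: alternative decomposition).

-- ===== PORT A =====
-- Shared formatting helpers = Python's f-string format specs (exact: 'x'/'X' pad AFTER the sign, '+d').
def hexDigitL (n : Nat) : Char := if n < 10 then Char.ofNat (48 + n) else Char.ofNat (87 + n)
def hexDigitU (n : Nat) : Char := if n < 10 then Char.ofNat (48 + n) else Char.ofNat (55 + n)

def hexChars (n : Nat) : List Char :=
  if _h : n < 16 then [hexDigitL n] else hexChars (n / 16) ++ [hexDigitL (n % 16)]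
decreasing_by exact Nat.div_lt_self (by omega) (by omega)

def hexCharsU (n : Nat) : List Char :=
  if _h : n < 16 then [hexDigitU n] else hexCharsU (n / 16) ++ [hexDigitU (n % 16)]
decreasing_by exact Nat.div_lt_self (by omega) (by omega)

-- f"{v:0{w}x}" : zero-pad to width w, the '-' of a negative number in front of the padding
def fmtHex (w : Nat) (v : Int) : List Char :=
  if v < 0 then '-' :: (List.replicate (w - 1 - (hexChars v.natAbs).length) '0' ++ hexChars v.natAbs)
  else List.replicate (w - (hexChars v.toNat).length) '0' ++ hexChars v.toNat

def fmtHexU (w : Nat) (v : Int) : List Char :=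
  if v < 0 then '-' :: (List.replicate (w - 1 - (hexCharsU v.natAbs).length) '0' ++ hexCharsU v.natAbs)
  else List.replicate (w - (hexCharsU v.toNat).length) '0' ++ hexCharsU v.toNat

-- f"{v:+d}"
def fmtPlus (v : Int) : List Char :=
  if v < 0 then PySem.Int.toChars v else '+' :: PySem.Int.toChars v

def opmap : PySem.Dict Int (String × Int) := PySem.Dict.mk
  [(0x00, ("NOP", 0)), (0x01, ("PUSH_IMM", 1)), (0x02, ("POP_REG", 1)), (0x03, ("MOV_RR", 1)),
   (0x04, ("ADD_RR", 1)), (0x05, ("SUB_RR", 1)), (0x06, ("CMP_REG_IMM", 2)), (0x07, ("JZ", 2)),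
   (0x08, ("JMP", 2)), (0x09, ("CALL", 1)), (0xF9, ("HALT", 0))]

-- b[i] ported as List.getD i 0: exact for the in-range indices; the out-of-range reads
-- (IndexError in Python) are excluded by Pre_disasm.
def read_u8 (b : List Int) (i : Nat) : Int × Nat := (b.getD i 0, i + 1)

def read_s8 (b : List Int) (i : Nat) : Int × Nat :=
  let v := b.getD i 0
  (if 0x80 ≤ v then v - 0x100 else v, i + 1)

def read_s16_le (b : List Int) (i : Nat) : Int × Nat :=
  let lo := b.getD i 0
  let hi := b.getD (i + 1) 0
  let v := PySem.Int.bor (hi <<< (8 : Nat)) lo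
  (if 0x8000 ≤ v then v - 0x10000 else v, i + 2)

def disasmGo (b : List Int) : Nat → Nat → List String
  | 0, _ => []
  | fuel + 1, i =>
    if i < b.length then
      let op := b.getD i 0
      let i1 := i + 1
      let name := ((PySem.Dict.get? opmap op).getD (String.ofList ("DB_0x".toList ++ fmtHexU 2 op), 0)).1
      if op = 0x01 then
        let r := read_s8 b i1
        String.ofList (fmtHex 4 (r.2 - 2) ++ ": PUSH_IMM ".toList ++ PySem.Int.toChars r.1) :: disasmGo b fuel r.2
      else if op = 0x02 then
        let r := read_u8 b i1
        String.ofList (fmtHex 4 (r.2 - 2) ++ ": POP_REG R".toList ++ PySem.Int.toChars (PySem.Int.band r.1 3)) :: disasmGo b fuel r.2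
      else if op = 0x03 ∨ op = 0x04 ∨ op = 0x05 then
        let r := read_u8 b i1
        let dst := PySem.Int.band (r.1 >>> (4 : Nat)) 0xF
        let src := PySem.Int.band r.1 0xF
        String.ofList (fmtHex 4 (r.2 - 2) ++ ": ".toList ++ name.toList ++ " R".toList ++
          PySem.Int.toChars (PySem.Int.band dst 3) ++ ",R".toList ++ PySem.Int.toChars (PySem.Int.band src 3)) :: disasmGo b fuel r.2
      else if op = 0x06 then
        let r1 := read_u8 b i1
        let r2 := read_s8 b r1.2
        String.ofList (fmtHex 4 (r2.2 - 3) ++ ": CMP_REG_IMM R".toList ++ PySem.Int.toChars (PySem.Int.band r1.1 3) ++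
          ", ".toList ++ PySem.Int.toChars r2.1) :: disasmGo b fuel r2.2
      else if op = 0x07 ∨ op = 0x08 then
        let r := read_s16_le b i1
        String.ofList (fmtHex 4 (r.2 - 3) ++ ": ".toList ++ name.toList ++ " ".toList ++ fmtPlus r.1) :: disasmGo b fuel r.2
      else if op = 0x09 then
        let r := read_u8 b i1
        String.ofList (fmtHex 4 (r.2 - 2) ++ ": CALL 0x".toList ++ fmtHex 2 r.1) :: disasmGo b fuel r.2
      else if op = 0xF9 then
        String.ofList (fmtHex 4 (i1 - 1) ++ ": HALT".toList) :: disasmGo b fuel i1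
      else
        String.ofList (fmtHex 4 (i1 - 1) ++ ": DB 0x".toList ++ fmtHex 2 op) :: disasmGo b fuel i1
    else []

-- while i < len(b): each iteration advances i by at least 1, so len(b) iterations suffice (fuel)
def disasm (b : List Int) : List String := disasmGo b b.length 0

-- ===== PORT B =====
def rS8 (b : List Int) (i : Nat) : List Int × Nat :=
  let v := b.getD i 0
  ([if 0x80 ≤ v then v - 0x100 else v], i + 1)

def rReg (b : List Int) (i : Nat) : List Int × Nat := ([PySem.Int.band (b.getD i 0) 3], i + 1)

def rPack (b : List Int) (i : Nat) : List Int × Nat :=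
  let v := b.getD i 0
  ([PySem.Int.band (v >>> (4 : Nat)) 3, PySem.Int.band v 3], i + 1)

def rS16 (b : List Int) (i : Nat) : List Int × Nat :=
  let v := PySem.Int.bor ((b.getD (i + 1) 0) <<< (8 : Nat)) (b.getD i 0)
  ([if 0x8000 ≤ v then v - 0x10000 else v], i + 2)

def rU8 (b : List Int) (i : Nat) : List Int × Nat := ([b.getD i 0], i + 1)

-- opcode → (operand readers, formatter); formatters are the f-string lambdas over the operand tuple
def specs : PySem.Dict Int (List (List Int → Nat → List Int × Nat) × (List Int → List Char)) :=
  PySem.Dict.mk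
    [(0x01, ([rS8], fun v => "PUSH_IMM ".toList ++ PySem.Int.toChars (v.getD 0 0))),
     (0x02, ([rReg], fun v => "POP_REG R".toList ++ PySem.Int.toChars (v.getD 0 0))),
     (0x03, ([rPack], fun v => "MOV_RR R".toList ++ PySem.Int.toChars (v.getD 0 0) ++ ",R".toList ++ PySem.Int.toChars (v.getD 1 0))),
     (0x04, ([rPack], fun v => "ADD_RR R".toList ++ PySem.Int.toChars (v.getD 0 0) ++ ",R".toList ++ PySem.Int.toChars (v.getD 1 0))),
     (0x05, ([rPack], fun v => "SUB_RR R".toList ++ PySem.Int.toChars (v.getD 0 0) ++ ",R".toList ++ PySem.Int.toChars (v.getD 1 0))),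
     (0x06, ([rReg, rS8], fun v => "CMP_REG_IMM R".toList ++ PySem.Int.toChars (v.getD 0 0) ++ ", ".toList ++ PySem.Int.toChars (v.getD 1 0))),
     (0x07, ([rS16], fun v => "JZ ".toList ++ fmtPlus (v.getD 0 0))),
     (0x08, ([rS16], fun v => "JMP ".toList ++ fmtPlus (v.getD 0 0))),
     (0x09, ([rU8], fun v => "CALL 0x".toList ++ fmtHex 2 (v.getD 0 0))),
     (0xF9, ([], fun _ => "HALT".toList))]

def disasmAltGo (b : List Int) : Nat → Nat → List String
  | 0, _ => []
  | fuel + 1, i =>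
    if i < b.length then
      let start := i
      let op := b.getD i 0
      let i1 := i + 1
      let sp := (PySem.Dict.get? specs op).getD ([], fun _ => "DB 0x".toList ++ fmtHex 2 op)
      let p := sp.1.foldl (fun (acc : List Int × Nat) r => let q := r b acc.2; (acc.1 ++ q.1, q.2)) ([], i1)
      String.ofList (fmtHex 4 start ++ ": ".toList ++ sp.2 p.1) :: disasmAltGo b fuel p.2
    else []

def disasm_alt (b : List Int) : List String := disasmAltGo b b.length 0

-- ===== PRECONDITION & SPEC =====
-- number of operand bytes the Python A reads after each opcode byte
def instrLen (op : Int) : Nat :=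
  if op = 1 ∨ op = 2 ∨ op = 3 ∨ op = 4 ∨ op = 5 ∨ op = 9 then 1
  else if op = 6 ∨ op = 7 ∨ op = 8 then 2
  else 0

-- structurally recursive so that `decide` can evaluate it: skip instrLen op operand bytes,
-- false when the stream ends inside an instruction's operands
def wfBytes : List Int → Bool
  | [] => true
  | op :: rest =>
    match instrLen op, rest with
    | 0, rest' => wfBytes rest'
    | 1, _ :: rest' => wfBytes rest'
    | 2, _ :: _ :: rest' => wfBytes rest'
    | _, _ => false

-- Pre_ excludes exactly the truncated streams, where an operand read in A is past the end (IndexError).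
def Pre_disasm (b : List Int) : Prop := wfBytes b = true
instance (b : List Int) : Decidable (Pre_disasm b) := by unfold Pre_disasm; infer_instance

def pvWitness_disasm : List Int := [1, 250, 3, 80, 249]

def Spec_disasm (b : List Int) (out : List String) : Prop := out = disasm_alt b
instance (b : List Int) (out : List String) : Decidable (Spec_disasm b out) := by unfold Spec_disasm; infer_instance

-- ===== CLAIM (what is proved, stated in full; the proofs are below) =====
def Claim_equal_disasm : Prop := ∀ (b : List Int), Dom_disasm b → Pre_disasm b → Spec_disasm b (disasm b)


-- ===== LEMMAS AND PROOFS =====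
-- Python '(x & 15) & 3 = x & 3' (A masks the packed nibble with 0xF and then with 3; B masks with 3 directly)
theorem band_band_15_3 (y : Int) : PySem.Int.band (PySem.Int.band y 15) 3 = PySem.Int.band y 3 := by
  have h15 : ∀ x : Nat, x &&& 15 = x % 16 := fun x => by
    simpa using Nat.and_two_pow_sub_one_eq_mod x 4
  have h3 : ∀ x : Nat, x &&& 3 = x % 4 := fun x => by
    simpa using Nat.and_two_pow_sub_one_eq_mod x 2
  have hc15 : ∀ x : Nat, 15 &&& x = x % 16 := fun x => by rw [Nat.and_comm]; exact h15 x
  have hc3 : ∀ x : Nat, 3 &&& x = x % 4 := fun x => by rw [Nat.and_comm]; exact h3 x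
  simp only [PySem.Int.band]
  norm_num
  split_ifs <;> simp [h15, h3, hc15, hc3] <;> omega

theorem isub2 (j : Nat) : (j : Int) + 1 + 1 - 2 = (j : Int) := by omega
theorem isub3 (j : Nat) : (j : Int) + 1 + 1 + 1 - 3 = (j : Int) := by omega
theorem isub23 (j : Nat) : (j : Int) + 1 + 2 - 3 = (j : Int) := by omega


theorem go_eq (b : List Int) (fuel : Nat) : ∀ i, disasmGo b fuel i = disasmAltGo b fuel i := by
  induction fuel with
  | zero => intro i; rfl
  | succ f ih =>
    intro i
    simp only [disasmGo, disasmAltGo]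
    by_cases hlen : i < b.length
    · simp only [if_pos hlen]
      set op := b.getD i 0 with hop
      by_cases h1 : op = 1
      · rw [h1]
        simp [specs, PySem.Dict.get?_mk_cons, read_s8, rS8, List.foldl, List.getD, ih, isub2]
      by_cases h2 : op = 2
      · rw [h2]
        simp [specs, PySem.Dict.get?_mk_cons, read_u8, rReg, List.foldl, List.getD, ih, isub2]
      by_cases h345 : op = 3 ∨ op = 4 ∨ op = 5
      · rcases h345 with h | h | h <;> rw [h] <;>
          simp [specs, opmap, PySem.Dict.get?_mk_cons, read_u8, rPack, List.foldl, List.getD,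
                ih, isub2, band_band_15_3]
      by_cases h6 : op = 6
      · rw [h6]
        simp [specs, PySem.Dict.get?_mk_cons, read_u8, read_s8, rReg, rS8, List.foldl,
              List.getD, ih, isub3]
      by_cases h78 : op = 7 ∨ op = 8
      · rcases h78 with h | h <;> rw [h] <;>
          simp [specs, opmap, PySem.Dict.get?_mk_cons, read_s16_le, rS16, List.foldl, List.getD,
                ih, isub23]
      by_cases h9 : op = 9
      · rw [h9]
        simp [specs, PySem.Dict.get?_mk_cons, read_u8, rU8, List.foldl, List.getD, ih, isub2]
      by_cases hF : op = 249
      · rw [hF]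
        simp [specs, PySem.Dict.get?_mk_cons, ih]
      · -- unknown opcode (incl. NOP 0x00): both emit the DB line
        have g1 : ¬((1 : Int) = op) := fun e => h1 e.symm
        have g2 : ¬((2 : Int) = op) := fun e => h2 e.symm
        have g3 : ¬((3 : Int) = op) := fun e => h345 (Or.inl e.symm)
        have g4 : ¬((4 : Int) = op) := fun e => h345 (Or.inr (Or.inl e.symm))
        have g5 : ¬((5 : Int) = op) := fun e => h345 (Or.inr (Or.inr e.symm))
        have g6 : ¬((6 : Int) = op) := fun e => h6 e.symm
        have g7 : ¬((7 : Int) = op) := fun e => h78 (Or.inl e.symm)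
        have g8 : ¬((8 : Int) = op) := fun e => h78 (Or.inr e.symm)
        have g9 : ¬((9 : Int) = op) := fun e => h9 e.symm
        have gF : ¬((249 : Int) = op) := fun e => hF e.symm
        have e1 : ((1 : Int) == op) = false := beq_eq_false_iff_ne.mpr g1
        have e2 : ((2 : Int) == op) = false := beq_eq_false_iff_ne.mpr g2
        have e3 : ((3 : Int) == op) = false := beq_eq_false_iff_ne.mpr g3
        have e4 : ((4 : Int) == op) = false := beq_eq_false_iff_ne.mpr g4
        have e5 : ((5 : Int) == op) = false := beq_eq_false_iff_ne.mpr g5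
        have e6 : ((6 : Int) == op) = false := beq_eq_false_iff_ne.mpr g6
        have e7 : ((7 : Int) == op) = false := beq_eq_false_iff_ne.mpr g7
        have e8 : ((8 : Int) == op) = false := beq_eq_false_iff_ne.mpr g8
        have e9 : ((9 : Int) == op) = false := beq_eq_false_iff_ne.mpr g9
        have eF : ((249 : Int) == op) = false := beq_eq_false_iff_ne.mpr gF
        simp [specs, PySem.Dict.get?, List.find?,
              h1, h2, h6, h9, hF, h345, h78, e1, e2, e3, e4, e5, e6, e7, e8, e9, eF, ih]
    · simp [hlen]

-- ===== VERDICT (by name: the statement is the Claim_ definition above) =====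
theorem disasm_spec : Claim_equal_disasm := by
  intro b _ _
  unfold Spec_disasm disasm disasm_alt
  exact go_eq b b.length 0
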